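-- pv_equiv track=rewrite | github.com/LaplaceFox/project-euler | pfact.py | totsieve
-- ===== SOURCE A (Python) =====
-- import math
--
-- def totsieve(n):
--     toSieve = list(range(n+1))
--     toSieve[0] = None
--     toSieve[1] = None
--
--     totients = [1]*(n+1)
--     totients[0] = None
--     totients[1] = None
--
--     for p in range(math.floor(math.sqrt(n+1))+1):
--         if toSieve[p] != None: # k is prime
--             toSieve[2*p::p] = [None]*len(toSieve[2*p::p])
--
--             for i in range(p,n+1,p):
--                 totients[i] *= p-1
--
--             k = 2
--             while p**k <= n:
--                 for i in range(p**k,n+1,p**k):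
--                     totients[i] *= p
--                 k += 1
--
--     primelist = list(filter(lambda x: x != None, toSieve))
--
--     return (primelist,totients)
-- ===== SOURCE B (Python) =====
-- import math
--
-- def totsieve(n):
--     # Boolean composite sieve; per-prime single pass over multiples that strips
--     # the full power of p to get the exponent, instead of A's Option-list sieve
--     # with slice assignment and the (p-1)-pass plus a p-pass for every power p**k.
--     limit = math.floor(math.sqrt(n + 1))
--     is_comp = [False] * (n + 1)
--     totients = [1] * (n + 1)
--     totients[0] = None
--     totients[1] = None
--     for p in range(2, limit + 1):
--         if not is_comp[p]:
--             for m in range(2 * p, n + 1, p):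
--                 is_comp[m] = True
--             for m in range(p, n + 1, p):
--                 t, a = m, 0
--                 while t % p == 0:
--                     t //= p
--                     a += 1
--                 totients[m] *= (p - 1) * p ** (a - 1)
--     primelist = [i for i in range(2, n + 1) if not is_comp[i]]
--     return (primelist, totients)
-- ===== Notes on version B (the rewrite author's own statement) =====
-- stated objective: alternative
-- what changed: B replaces A's Option-list sieve with slice assignment and its per-prime (p-1)-pass plus one pass per prime power p**k by a Boolean composite sieve plus a single pass per prime over its multiples that strips the full power of p to get the exponent directly.
-- outside the precondition, e.g. on totsieve(0): A raises IndexError, B raises IndexError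
import Mathlib
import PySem

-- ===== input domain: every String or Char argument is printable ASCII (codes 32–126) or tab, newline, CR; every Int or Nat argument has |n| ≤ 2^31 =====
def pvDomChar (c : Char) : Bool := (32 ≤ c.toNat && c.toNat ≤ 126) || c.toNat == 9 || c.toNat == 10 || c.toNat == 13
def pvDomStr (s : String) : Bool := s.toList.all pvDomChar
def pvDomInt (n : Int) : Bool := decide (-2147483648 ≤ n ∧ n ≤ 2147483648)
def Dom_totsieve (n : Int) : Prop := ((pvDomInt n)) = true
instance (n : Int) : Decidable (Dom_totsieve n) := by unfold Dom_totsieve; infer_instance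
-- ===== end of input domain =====

-- B replaces A's Option-list sieve with slice assignment and its per-prime-power totient
-- passes by a Boolean composite sieve plus one pass per prime that strips the full p-power
-- of each multiple (objective: alternative algorithm, similar cost).

-- ===== PORT A =====

-- totients[i] *= c  (index i ≥ 2 on every reached input, where the entry is an int;
-- Option.map is exact there)
def pvMulAt (ts : List (Option Int)) (i : Int) (c : Int) : List (Option Int) :=
  ts.modify i.toNat (Option.map (· * c))

-- the 'k = 2; while p**k <= n: …; k += 1' loop; fuel-based recursion: on every reached
-- input p ≥ 2, so the loop runs at most log₂ n < fuel times and the guard stops it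
def pvWhileA (n p : Int) (k : Nat) (tots : List (Option Int)) : Nat → List (Option Int)
  | 0 => tots
  | fuel+1 =>
    if p ^ k ≤ n then
      pvWhileA n p (k+1)
        ((PySem.List.pyRange (p^k) (n+1) (p^k)).foldl (fun t i => pvMulAt t i p) tots) fuel
    else tots

def totsieve (n : Int) : List Int × List (Option Int) :=
  -- toSieve = list(range(n+1)); toSieve[0] = None; toSieve[1] = None
  let toSieve : List (Option Int) := (PySem.List.pyRange 0 (n+1) 1).map some
  let toSieve := PySem.List.pySetD (PySem.List.pySetD toSieve 0 none) 1 none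
  -- totients = [1]*(n+1); totients[0] = None; totients[1] = None
  let tot : List (Option Int) := PySem.List.pyRepeat [some 1] (n+1)
  let tot := PySem.List.pySetD (PySem.List.pySetD tot 0 none) 1 none
  -- math.floor(math.sqrt(n+1)) : exact as Nat.sqrt for 0 ≤ n+1 ≤ 2^31 (double sqrt is
  -- correctly rounded and these values are far from halfway cases)
  let L : Int := (Nat.sqrt (n+1).toNat : Int)
  let st := (PySem.List.pyRange 0 (L+1) 1).foldl (fun st p =>
    if PySem.List.pyGetD st.1 p none ≠ none then  -- toSieve[p] != None
      -- toSieve[2*p::p] = [None]*len(toSieve[2*p::p])  (elementwise: set each hit index)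
      let sv := (PySem.List.pyRange (2*p) (n+1) p).foldl
                  (fun s i => PySem.List.pySetD s i none) st.1
      -- for i in range(p, n+1, p): totients[i] *= p-1
      let t1 := (PySem.List.pyRange p (n+1) p).foldl (fun t i => pvMulAt t i (p-1)) st.2
      (sv, pvWhileA n p 2 t1 ((n+1).toNat + 2))
    else st) (toSieve, tot)
  -- primelist = list(filter(lambda x: x != None, toSieve))
  (st.1.filterMap id, st.2)

-- ===== PORT B =====

-- 't, a = m, 0; while t % p == 0: t //= p; a += 1' returning a; fuel t.toNat suffices:
-- on every reached input p ≥ 2 and t ≥ 1, so t strictly decreases each iteration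
def pvStrip (p t a : Int) : Nat → Int
  | 0 => a
  | fuel+1 =>
    if PySem.Int.mod t p = 0 then pvStrip p (PySem.Int.floordiv t p) (a+1) fuel else a

def totsieve_alt (n : Int) : List Int × List (Option Int) :=
  -- limit = math.floor(math.sqrt(n+1)) : exact as Nat.sqrt on the admitted domain
  let limit : Int := (Nat.sqrt (n+1).toNat : Int)
  let isComp : List Bool := PySem.List.pyRepeat [false] (n+1)
  let tot : List (Option Int) := PySem.List.pyRepeat [some 1] (n+1)
  let tot := PySem.List.pySetD (PySem.List.pySetD tot 0 none) 1 none
  let st := (PySem.List.pyRange 2 (limit+1) 1).foldl (fun st p =>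
    if PySem.List.pyGetD st.1 p false = false then  -- not is_comp[p]
      let ic := (PySem.List.pyRange (2*p) (n+1) p).foldl
                  (fun s m => PySem.List.pySetD s m true) st.1
      let tt := (PySem.List.pyRange p (n+1) p).foldl (fun t m =>
          let a := pvStrip p m 0 m.toNat
          -- p ** (a-1): a ≥ 1 on every reached input (p divides m), so .toNat is exact
          pvMulAt t m ((p-1) * p ^ (a-1).toNat)) st.2
      (ic, tt)
    else st) (isComp, tot)
  ((PySem.List.pyRange 2 (n+1) 1).filter
      (fun i => PySem.List.pyGetD st.1 i false = false), st.2)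

-- ===== PRECONDITION & SPEC =====
-- Pre_ excludes n ≤ 0, on which A raises IndexError at 'toSieve[1] = None' (B raises there too)
def Pre_totsieve (n : Int) : Prop := 1 ≤ n
instance (n : Int) : Decidable (Pre_totsieve n) := by unfold Pre_totsieve; infer_instance
def pvWitness_totsieve : Int := 12

def Spec_totsieve (n : Int) (out : List Int × List (Option Int)) : Prop := out = totsieve_alt n
instance (n : Int) (out : List Int × List (Option Int)) : Decidable (Spec_totsieve n out) := by
  unfold Spec_totsieve; infer_instance

-- ===== CLAIM (what is proved, stated in full; the proofs are below) =====
def Claim_equal_totsieve : Prop :=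
  ∀ (n : Int), Dom_totsieve n → Pre_totsieve n → Spec_totsieve n (totsieve n)


-- ===== LEMMAS AND PROOFS =====

-- invariant tying A's Option-Int sieve list to B's Boolean composite list
def pvRel (N : Nat) (sv : List (Option Int)) (ic : List Bool) : Prop :=
  sv.length = N ∧ ic.length = N ∧
  ∀ j : Nat, sv[j]? = ic[j]?.map (fun b => if j < 2 ∨ b = true then none else some (j:Int))

lemma pvNodup_pyRange (a b s : Int) (hs : 0 < s) : (PySem.List.pyRange a b s).Nodup := by
  rw [PySem.List.pyRange_of_pos a b hs]
  refine List.Nodup.map ?_ (List.nodup_range)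
  intro k1 k2 h
  have hs2 : s * (k1:Int) = s * (k2:Int) := by linarith
  have : (k1 : Int) = (k2 : Int) := mul_left_cancel₀ hs.ne' hs2
  exact_mod_cast this

lemma pvMulAt_getElem? (ts : List (Option Int)) (i c : Int) (j : Nat) :
    (pvMulAt ts i c)[j]? = ts[j]?.map (fun a => if i.toNat = j then a.map (· * c) else a) := by
  simp [pvMulAt, List.getElem?_modify, Option.map]

lemma pvFoldMul_getElem? (c : Int → Int) :
    ∀ (idxs : List Int) (ts : List (Option Int)) (j : Nat),
      idxs.Nodup → (∀ i ∈ idxs, 0 < i) →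
      (idxs.foldl (fun t i => pvMulAt t i (c i)) ts)[j]? =
        ts[j]?.map (Option.map (· * (if (j:Int) ∈ idxs then c (j:Int) else 1))) := by
  intro idxs
  induction idxs with
  | nil => intro ts j _ _; simp
  | cons i idxs ih =>
    intro ts j hnd hpos
    rw [List.foldl_cons,
        ih _ j (List.nodup_cons.mp hnd).2 (fun x hx => hpos x (List.mem_cons_of_mem _ hx)),
        pvMulAt_getElem?, Option.map_map]
    have hi : 0 < i := hpos i List.mem_cons_self
    by_cases h : i = (j:Int)
    · have hij : i.toNat = j := by omega
      have hjn : (j:Int) ∉ idxs := fun hc => (List.nodup_cons.mp hnd).1 (h ▸ hc)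
      rcases ht : ts[j]? with _ | o
      · simp
      · rcases o with _ | x <;> simp [Function.comp, hij, h, hjn, List.mem_cons]
    · have hij : i.toNat ≠ j := fun hc => h (by omega)
      have hji : ¬ (j:Int) = i := fun hc => h hc.symm
      rcases ht : ts[j]? with _ | o
      · simp
      · rcases o with _ | x <;> simp [Function.comp, hij, hji, List.mem_cons]

lemma pvCountShift (Q : Nat → Bool) (k fuel : Nat) :
    (List.range (fuel+1)).countP (fun d => Q (k+d)) =
      (if Q k then 1 else 0) + (List.range fuel).countP (fun d => Q ((k+1)+d)) := by
  rw [List.range_succ_eq_map, List.countP_cons, List.countP_map]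
  have : ((fun d => Q (k+d)) ∘ Nat.succ) = fun d => Q ((k+1)+d) := by
    funext d
    show Q (k + (d+1)) = Q ((k+1)+d)
    congr 1
    omega
  rw [this, Nat.add_comm]
  simp

lemma pvWhileA_getElem? (n p : Int) (hp : 1 ≤ p) :
    ∀ (fuel k : Nat) (ts : List (Option Int)) (j : Nat),
      (pvWhileA n p k ts fuel)[j]? =
        ts[j]?.map (Option.map (· * p ^ ((List.range fuel).countP
          (fun d => decide (p^(k+d) ≤ n ∧
            (j:Int) ∈ PySem.List.pyRange (p^(k+d)) (n+1) (p^(k+d))))))) := by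
  intro fuel
  induction fuel with
  | zero =>
    intro k ts j
    rcases ht : ts[j]? with _ | o
    · simp [pvWhileA, ht]
    · rcases o with _ | x <;> simp [pvWhileA, ht]
  | succ fuel ih =>
    intro k ts j
    rw [pvWhileA]
    by_cases h : p ^ k ≤ n
    · rw [if_pos h, ih (k+1)]
      have hq : (0:Int) < p ^ k := pow_pos (by omega) k
      rw [pvFoldMul_getElem? (fun _ => p) _ _ j (pvNodup_pyRange _ _ _ hq)
          (fun i hi => lt_of_lt_of_le hq ((PySem.List.mem_pyRange_iff_of_pos hq i).mp hi).1),
          Option.map_map,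
          pvCountShift (fun m => decide (p^m ≤ n ∧
            (j:Int) ∈ PySem.List.pyRange (p^m) (n+1) (p^m))) k fuel]
      rcases ht : ts[j]? with _ | o
      · simp
      · rcases o with _ | x
        · simp
        · by_cases hm : (j:Int) ∈ PySem.List.pyRange (p^k) (n+1) (p^k) <;>
            simp [Function.comp, hm, h, pow_add] <;> ring
    · rw [if_neg h]
      have hc0 : (List.range (fuel+1)).countP
          (fun d => decide (p^(k+d) ≤ n ∧
            (j:Int) ∈ PySem.List.pyRange (p^(k+d)) (n+1) (p^(k+d)))) = 0 := by
        apply List.countP_eq_zero.mpr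
        intro d _
        simp only [decide_eq_true_eq, not_and]
        intro hle
        exact absurd (le_trans (pow_le_pow_right₀ (by omega : (1:Int) ≤ p)
          (Nat.le_add_right k d)) hle) h
      rw [hc0]
      rcases ht : ts[j]? with _ | o
      · simp [ht]
      · rcases o with _ | x <;> simp [ht]

lemma pvStrip_spec (p : Int) (hp : 2 ≤ p) :
    ∀ (fuel : Nat) (t a : Int), 1 ≤ t → t ≤ (fuel : Int) →
      ∃ (e : Nat) (t' : Int),
        pvStrip p t a fuel = a + e ∧ t = p ^ e * t' ∧ ¬ (p ∣ t') ∧ 1 ≤ t' := by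
  intro fuel
  induction fuel with
  | zero => intro t a ht hle; exfalso; omega
  | succ fuel ih =>
    intro t a ht hle
    rw [pvStrip]
    by_cases hd : p ∣ t
    · rw [if_pos ((PySem.Int.mod_eq_zero_iff_dvd t p).mpr hd)]
      have hp0 : (0:Int) < p := by omega
      have hfd : PySem.Int.floordiv t p = t / p := PySem.Int.floordiv_eq_ediv_of_pos hp0
      have ht2 : t = p * (t / p) := (Int.mul_ediv_cancel' hd).symm
      have ht2pos : 1 ≤ t / p := by
        by_cases h : 1 ≤ t / p
        · exact h
        · exfalso; push_neg at h; nlinarith [ht2]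
      have ht2le : t / p ≤ (fuel : Int) := by
        have : 2 * (t / p) ≤ t := by nlinarith [ht2]
        push_cast at hle ⊢
        omega
      obtain ⟨e, t', he, hrepr, hnd, ht'⟩ := ih (t / p) (a + 1) ht2pos ht2le
      refine ⟨e + 1, t', ?_, ?_, hnd, ht'⟩
      · rw [hfd, he]; push_cast; ring
      · rw [ht2, hrepr]; ring
    · rw [if_neg (by
        intro hc
        exact hd ((PySem.Int.mod_eq_zero_iff_dvd t p).mp hc))]
      exact ⟨0, t, by simp, by simp, hd, ht⟩

lemma pvPowDvd (p t' : Int) (e : Nat) (hp : 2 ≤ p) (h : ¬ p ∣ t') (k : Nat) :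
    p ^ k ∣ p ^ e * t' ↔ k ≤ e := by
  constructor
  · intro hd
    by_contra hk
    push_neg at hk
    have h1 : p ^ (e+1) ∣ p ^ e * t' := dvd_trans (pow_dvd_pow p (by omega)) hd
    obtain ⟨q, hq⟩ := h1
    have hpe : (p:Int) ^ e ≠ 0 := pow_ne_zero _ (by omega)
    have : t' = p * q := by
      apply mul_left_cancel₀ hpe
      rw [hq]; ring
    exact h ⟨q, this⟩
  · intro hk
    exact Dvd.dvd.mul_right (pow_dvd_pow p hk) t'

lemma pvCountP_range_lt (f c : Nat) :
    (List.range f).countP (fun d => decide (d < c)) = min c f := by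
  induction f with
  | zero => simp
  | succ f ih =>
    rw [List.range_succ, List.countP_append, ih]
    by_cases h : f < c <;> simp [h] <;> omega

lemma pvTotStep (n p : Int) (hn : 1 ≤ n) (hp : 2 ≤ p) (ts : List (Option Int)) :
    pvWhileA n p 2 ((PySem.List.pyRange p (n+1) p).foldl (fun t i => pvMulAt t i (p-1)) ts)
        ((n+1).toNat + 2) =
      (PySem.List.pyRange p (n+1) p).foldl
        (fun t m => pvMulAt t m ((p-1) * p ^ ((pvStrip p m 0 m.toNat - 1).toNat))) ts := by
  have hp0 : (0:Int) < p := by omega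
  have hmemz : ∀ i ∈ PySem.List.pyRange p (n+1) p, 0 < i :=
    fun i hi => lt_of_lt_of_le hp0 ((PySem.List.mem_pyRange_iff_of_pos hp0 i).mp hi).1
  apply List.ext_getElem?
  intro j
  rw [pvWhileA_getElem? n p (by omega),
      pvFoldMul_getElem? (fun _ => (p-1)) _ _ j (pvNodup_pyRange _ _ _ hp0) hmemz,
      pvFoldMul_getElem? (fun m => (p-1) * p ^ ((pvStrip p m 0 m.toNat - 1).toNat)) _ _ j
        (pvNodup_pyRange _ _ _ hp0) hmemz,
      Option.map_map]
  by_cases hm : (j:Int) ∈ PySem.List.pyRange p (n+1) p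
  · obtain ⟨h1, h2, h3⟩ := (PySem.List.mem_pyRange_iff_of_pos hp0 _).mp hm
    have hdvd : p ∣ (j:Int) := by simpa using dvd_add h3 (dvd_refl p)
    have hj1 : (1:Int) ≤ (j:Int) := by omega
    obtain ⟨e, t', he, hrepr, hnd, ht'⟩ :=
      pvStrip_spec p hp ((j:Int)).toNat (j:Int) 0 hj1 (by simp)
    have he1 : 1 ≤ e := by
      by_contra h0
      have he0 : e = 0 := by omega
      rw [he0, pow_zero, one_mul] at hrepr
      exact hnd (hrepr ▸ hdvd)
    have hstrip : pvStrip p (j:Int) 0 ((j:Int)).toNat = (e:Int) := by rw [he]; simp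
    have hexp : ((pvStrip p (j:Int) 0 ((j:Int)).toNat - 1).toNat) = e - 1 := by
      rw [hstrip]; omega
    have hjle : p ^ e ≤ (j:Int) := by
      rw [hrepr]
      exact le_mul_of_one_le_right (le_of_lt (pow_pos hp0 e)) ht'
    have hEn : (e:Int) ≤ n := by
      have h2e : ((2:Int))^e ≤ p^e := pow_le_pow_left₀ (by omega) (by omega) e
      have : (e:Int) < 2^e := by exact_mod_cast Nat.lt_two_pow_self
      omega
    have hcount : (List.range ((n+1).toNat + 2)).countP
        (fun d => decide (p^(2+d) ≤ n ∧
          (j:Int) ∈ PySem.List.pyRange (p^(2+d)) (n+1) (p^(2+d)))) = e - 1 := by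
      rw [List.countP_congr (q := fun d => decide (d < e - 1)) ?_, pvCountP_range_lt]
      · omega
      · intro d _
        simp only [decide_eq_true_eq]
        constructor
        · rintro ⟨hle, hmem⟩
          have hq : (0:Int) < p^(2+d) := pow_pos hp0 _
          obtain ⟨m1, m2, m3⟩ := (PySem.List.mem_pyRange_iff_of_pos hq _).mp hmem
          have hdj : p^(2+d) ∣ (j:Int) := by simpa using dvd_add m3 (dvd_refl (p^(2+d)))
          have := (pvPowDvd p t' e hp hnd (2+d)).mp (hrepr ▸ hdj)
          omega
        · intro hd
          have h2de : 2+d ≤ e := by omega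
          have hdj : p^(2+d) ∣ (j:Int) := hrepr ▸ (pvPowDvd p t' e hp hnd (2+d)).mpr h2de
          have hlej : p^(2+d) ≤ (j:Int) := Int.le_of_dvd (by omega) hdj
          refine ⟨by omega, (PySem.List.mem_pyRange_iff_of_pos (pow_pos hp0 _) _).mpr
            ⟨hlej, h2, Int.dvd_sub hdj (dvd_refl _)⟩⟩
    rw [hcount, hexp]
    rcases ht : ts[j]? with _ | o
    · simp
    · rcases o with _ | x
      · simp [hm]
      · simp [hm, mul_assoc]
  · have hcount0 : (List.range ((n+1).toNat + 2)).countP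
        (fun d => decide (p^(2+d) ≤ n ∧
          (j:Int) ∈ PySem.List.pyRange (p^(2+d)) (n+1) (p^(2+d)))) = 0 := by
      apply List.countP_eq_zero.mpr
      intro d _
      simp only [decide_eq_true_eq, not_and]
      intro _ hmem
      have hq : (0:Int) < p^(2+d) := pow_pos hp0 _
      obtain ⟨m1, m2, m3⟩ := (PySem.List.mem_pyRange_iff_of_pos hq _).mp hmem
      have hdj : p^(2+d) ∣ (j:Int) := by simpa using dvd_add m3 (dvd_refl (p^(2+d)))
      have hpj : p ∣ (j:Int) := dvd_trans (dvd_pow_self p (by omega : 2+d ≠ 0)) hdj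
      have hplej : p ≤ (j:Int) := le_trans (le_self_pow₀ (by omega) (by omega)) m1
      exact hm ((PySem.List.mem_pyRange_iff_of_pos hp0 _).mpr
        ⟨hplej, m2, Int.dvd_sub hpj (dvd_refl p)⟩)
    rw [hcount0]
    rcases ht : ts[j]? with _ | o
    · simp
    · rcases o with _ | x <;> simp [hm]

lemma pvMarkRel (N : Nat) :
    ∀ (idxs : List Int) (sv : List (Option Int)) (ic : List Bool),
      (∀ i ∈ idxs, 0 ≤ i) → pvRel N sv ic →
      pvRel N (idxs.foldl (fun s i => PySem.List.pySetD s i none) sv)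
              (idxs.foldl (fun s i => PySem.List.pySetD s i true) ic) := by
  intro idxs
  induction idxs with
  | nil => intro sv ic _ h; exact h
  | cons i idxs ih =>
    intro sv ic hpos h
    rw [List.foldl_cons, List.foldl_cons]
    apply ih _ _ (fun x hx => hpos x (List.mem_cons_of_mem _ hx))
    obtain ⟨hl1, hl2, hrel⟩ := h
    have hi : 0 ≤ i := hpos i List.mem_cons_self
    rw [PySem.List.pySetD_of_nonneg _ _ hi, PySem.List.pySetD_of_nonneg _ _ hi]
    refine ⟨by simp [hl1], by simp [hl2], ?_⟩
    intro j
    rw [List.getElem?_set, List.getElem?_set, hl1, hl2]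
    by_cases hij : i.toNat = j
    · by_cases hjN : j < N <;> simp [hij, hjN]
    · simp [hij, hrel j]

lemma pvOuter (n : Int) (N : Nat) (hn : 1 ≤ n) (hN : N = (n+1).toNat) :
    ∀ (P : List Int), (∀ p ∈ P, 2 ≤ p ∧ p < (N:Int)) →
    ∀ (sv : List (Option Int)) (ic : List Bool) (ts : List (Option Int)), pvRel N sv ic →
      pvRel N (P.foldl (fun st p =>
          if PySem.List.pyGetD st.1 p none ≠ none then
            ((PySem.List.pyRange (2*p) (n+1) p).foldl
                (fun s i => PySem.List.pySetD s i none) st.1,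
             pvWhileA n p 2
               ((PySem.List.pyRange p (n+1) p).foldl (fun t i => pvMulAt t i (p-1)) st.2)
               ((n+1).toNat + 2))
          else st) (sv, ts)).1
        (P.foldl (fun st p =>
          if PySem.List.pyGetD st.1 p false = false then
            ((PySem.List.pyRange (2*p) (n+1) p).foldl
                (fun s m => PySem.List.pySetD s m true) st.1,
             (PySem.List.pyRange p (n+1) p).foldl (fun t m =>
                pvMulAt t m ((p-1) * p ^ ((pvStrip p m 0 m.toNat - 1).toNat))) st.2)
          else st) (ic, ts)).1 ∧
      (P.foldl (fun st p =>
          if PySem.List.pyGetD st.1 p none ≠ none then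
            ((PySem.List.pyRange (2*p) (n+1) p).foldl
                (fun s i => PySem.List.pySetD s i none) st.1,
             pvWhileA n p 2
               ((PySem.List.pyRange p (n+1) p).foldl (fun t i => pvMulAt t i (p-1)) st.2)
               ((n+1).toNat + 2))
          else st) (sv, ts)).2 =
        (P.foldl (fun st p =>
          if PySem.List.pyGetD st.1 p false = false then
            ((PySem.List.pyRange (2*p) (n+1) p).foldl
                (fun s m => PySem.List.pySetD s m true) st.1,
             (PySem.List.pyRange p (n+1) p).foldl (fun t m =>
                pvMulAt t m ((p-1) * p ^ ((pvStrip p m 0 m.toNat - 1).toNat))) st.2)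
          else st) (ic, ts)).2 := by
  intro P
  induction P with
  | nil => intro _ sv ic ts h; exact ⟨h, rfl⟩
  | cons p P ih =>
    intro hP sv ic ts h
    obtain ⟨hp2, hpN⟩ := hP p List.mem_cons_self
    obtain ⟨hl1, hl2, hrel⟩ := h
    simp only [List.foldl_cons]
    have hptN : p.toNat < ic.length := by omega
    have hbD : ic[p.toNat]? = some (ic.getD p.toNat false) := by
      simp [List.getD_eq_getElem?_getD, List.getElem?_eq_getElem hptN]
    have hgB : PySem.List.pyGetD ic p false = ic.getD p.toNat false := by
      conv_lhs => rw [show p = ((p.toNat : Nat) : Int) from by omega]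
      rw [PySem.List.pyGetD_natCast]
    have hgA : PySem.List.pyGetD sv p none =
        (if p.toNat < 2 ∨ ic.getD p.toNat false = true then none
         else some ((p.toNat : Nat) : Int)) := by
      conv_lhs => rw [show p = ((p.toNat : Nat) : Int) from by omega]
      rw [PySem.List.pyGetD_natCast, List.getD_eq_getElem?_getD, hrel p.toNat, hbD]
      rfl
    cases hbv : ic.getD p.toNat false with
    | false =>
      rw [hbv] at hgA hgB
      rw [hgA, hgB,
          if_neg (show ¬(p.toNat < 2 ∨ (false:Bool) = true) by simp; omega)]
      rw [if_pos (by simp), if_pos rfl]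
      rw [pvTotStep n p hn (by omega)]
      apply ih (fun q hq => hP q (List.mem_cons_of_mem _ hq))
      exact pvMarkRel N _ sv ic
        (fun i hi2 => le_of_lt (lt_of_lt_of_le (by omega : (0:Int) < 2*p)
          ((PySem.List.mem_pyRange_iff_of_pos (by omega : (0:Int) < p) i).mp hi2).1))
        ⟨hl1, hl2, hrel⟩
    | true =>
      rw [hbv] at hgA hgB
      rw [hgA, hgB, if_pos (Or.inr rfl), if_neg (by simp), if_neg (by simp)]
      exact ih (fun q hq => hP q (List.mem_cons_of_mem _ hq)) sv ic ts ⟨hl1, hl2, hrel⟩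

lemma pvRelInit (n : Int) (hn : 1 ≤ n) :
    pvRel (n+1).toNat
      (PySem.List.pySetD (PySem.List.pySetD ((PySem.List.pyRange 0 (n+1) 1).map some) 0 none) 1 none)
      (PySem.List.pyRepeat [false] (n+1)) := by
  have hN : 2 ≤ (n+1).toNat := by omega
  refine ⟨?_, ?_, ?_⟩
  · rw [PySem.List.length_pySetD, PySem.List.length_pySetD, List.length_map,
        PySem.List.length_pyRange_one]
    omega
  · rw [PySem.List.pyRepeat_singleton, List.length_replicate]
  · intro j
    rw [PySem.List.pyRepeat_singleton,
        PySem.List.pySetD_of_nonneg _ none (by norm_num : (0:Int) ≤ 1),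
        PySem.List.pySetD_of_nonneg _ none (le_refl 0)]
    simp only [Int.toNat_one, Int.toNat_zero]
    rw [List.getElem?_set, List.getElem?_set, List.getElem?_map, List.getElem?_replicate]
    simp only [List.length_set, List.length_map, PySem.List.length_pyRange_one,
      PySem.List.getElem?_pyRange_one]
    have h0 : ((n:Int)+1-0).toNat = (n+1).toNat := by omega
    rcases j with _ | j
    · simp [hN]
    rcases j with _ | j
    · simp [hN, h0]
    · by_cases hj : j + 2 < (n+1).toNat
      · simp [h0, hj, show j+1+1 = j+2 by omega]
      · simp [h0, hj, show j+1+1 = j+2 by omega]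

lemma pvFilterMapIte (P : Nat → Prop) [DecidablePred P] (g : Nat → Int) :
    ∀ l : List Nat,
      l.filterMap (fun j => if P j then none else some (g j)) =
        (l.filter (fun j => decide (¬ P j))).map g := by
  intro l
  induction l with
  | nil => simp
  | cons a l ih =>
    by_cases h : P a <;> simp [h, ih]

lemma pvPrimelist (n : Int) (hn : 1 ≤ n) (sv : List (Option Int)) (ic : List Bool)
    (h : pvRel (n+1).toNat sv ic) :
    sv.filterMap id =
      (PySem.List.pyRange 2 (n+1) 1).filter (fun i => PySem.List.pyGetD ic i false = false) := by
  obtain ⟨hl1, hl2, hrel⟩ := h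
  have hN : 2 ≤ (n+1).toNat := by omega
  have hsv : sv = (List.range (n+1).toNat).map
      (fun j => if (j < 2 ∨ ic.getD j false = true) then none else some (j:Int)) := by
    apply List.ext_getElem?
    intro j
    rw [List.getElem?_map, hrel j]
    by_cases hj : j < (n+1).toNat
    · have hjic : j < ic.length := by omega
      rw [List.getElem?_eq_getElem hjic, List.getElem?_range hj]
      simp [List.getD_eq_getElem?_getD, List.getElem?_eq_getElem hjic]
    · rw [List.getElem?_eq_none (by omega : ic.length ≤ j),
          List.getElem?_eq_none (by simpa using hj)]
      rfl
  rw [hsv, List.filterMap_map, Function.id_comp,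
      pvFilterMapIte (fun j => j < 2 ∨ ic.getD j false = true) (fun j => (j:Int))]
  have hsplit : (n+1).toNat = 2 + ((n+1).toNat - 2) := by omega
  rw [hsplit, List.range_add, List.filter_append]
  rw [show List.range 2 = [0, 1] from by decide]
  rw [show ([0,1] : List Nat).filter
        (fun j => decide (¬(j < 2 ∨ ic.getD j false = true))) = [] from by simp,
      List.nil_append, List.filter_map, PySem.List.pyRange_one 2 (n+1),
      show ((n:Int)+1-2).toNat = (n+1).toNat - 2 from by omega,
      List.filter_map]
  have hpred : ∀ k ∈ List.range ((n+1).toNat - 2),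
      ((fun j => decide (¬(j < 2 ∨ ic.getD j false = true))) ∘ (fun x => 2 + x)) k =
        ((fun i => decide (PySem.List.pyGetD ic i false = false)) ∘
          (fun k : Nat => 2 + (k:Int))) k := by
    intro k _
    have hcast : PySem.List.pyGetD ic ((2:Int) + (k:Int)) false = ic.getD (2+k) false := by
      rw [show (2:Int) + (k:Int) = ((2+k : Nat) : Int) from by push_cast; ring]
      exact PySem.List.pyGetD_natCast ic (2+k) false
    simp only [Function.comp]
    simp only [hcast]
    cases hb : ic.getD (2+k) false <;> simp [hb] <;> omega
  rw [List.filter_congr hpred, List.map_map]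
  apply List.map_congr_left
  intro k _
  simp only [Function.comp]
  push_cast
  ring


-- ===== VERDICT (by name: the statement is the Claim_ definition above) =====
theorem totsieve_spec : Claim_equal_totsieve := by
  intro n _ hpre
  have hn : (1:Int) ≤ n := hpre
  show totsieve n = totsieve_alt n
  have hN2 : 2 ≤ (n+1).toNat := by omega
  have hL1 : 1 ≤ Nat.sqrt (n+1).toNat := Nat.sqrt_pos.mpr (by omega)
  have hLN : Nat.sqrt (n+1).toNat < (n+1).toNat := Nat.sqrt_lt_self (by omega)
  have hLNi : ((Nat.sqrt (n+1).toNat : Nat) : Int) < (((n+1).toNat : Nat) : Int) := by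
    exact_mod_cast hLN
  have hrel0 := pvRelInit n hn
  obtain ⟨hl1, hl2, hrel⟩ := hrel0
  have h00 : (PySem.List.pySetD (PySem.List.pySetD
      ((PySem.List.pyRange 0 (n+1) 1).map some) 0 none) 1 none)[0]? = some none := by
    rw [hrel 0, PySem.List.pyRepeat_singleton, List.getElem?_replicate]
    simp [show 0 < (n+1).toNat from by omega]
  have h01 : (PySem.List.pySetD (PySem.List.pySetD
      ((PySem.List.pyRange 0 (n+1) 1).map some) 0 none) 1 none)[1]? = some none := by
    rw [hrel 1, PySem.List.pyRepeat_singleton, List.getElem?_replicate]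
    simp [show 1 < (n+1).toNat from by omega]
  have h0 : PySem.List.pyGetD (PySem.List.pySetD (PySem.List.pySetD
      ((PySem.List.pyRange 0 (n+1) 1).map some) 0 none) 1 none) 0 none = none := by
    rw [PySem.List.pyGetD_zero, List.getD_eq_getElem?_getD, h00]; rfl
  have h1 : PySem.List.pyGetD (PySem.List.pySetD (PySem.List.pySetD
      ((PySem.List.pyRange 0 (n+1) 1).map some) 0 none) 1 none) 1 none = none := by
    rw [PySem.List.pyGetD_ofNat' _ 1 _, List.getD_eq_getElem?_getD, h01]; rfl
  simp only [totsieve, totsieve_alt]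
  rw [PySem.List.pyRange_one_append 0 2 ((Nat.sqrt (n+1).toNat : Int) + 1) (by norm_num)
        (by push_cast; omega),
      List.foldl_append,
      show PySem.List.pyRange 0 2 = [0, 1] from by decide]
  simp only [List.foldl_cons, List.foldl_nil, h0, h1, ne_eq,
    not_true_eq_false, if_false]
  have hbounds : ∀ q ∈ PySem.List.pyRange 2 ((Nat.sqrt (n+1).toNat : Int) + 1),
      2 ≤ q ∧ q < (((n+1).toNat : Nat) : Int) := by
    intro q hq
    obtain ⟨hq1, hq2⟩ := PySem.List.mem_pyRange_one.mp hq
    exact ⟨hq1, by omega⟩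
  have hout := pvOuter n (n+1).toNat hn rfl
    (PySem.List.pyRange 2 ((Nat.sqrt (n+1).toNat : Int) + 1)) hbounds
    (PySem.List.pySetD (PySem.List.pySetD
      ((PySem.List.pyRange 0 (n+1) 1).map some) 0 none) 1 none)
    (PySem.List.pyRepeat [false] (n+1))
    (PySem.List.pySetD (PySem.List.pySetD (PySem.List.pyRepeat [some 1] (n+1)) 0 none) 1 none)
    ⟨hl1, hl2, hrel⟩
  rw [Prod.mk.injEq]
  exact ⟨pvPrimelist n hn _ _ hout.1, hout.2⟩
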